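-- pv_equiv track=rewrite | github.com/yonggoghi/AgenticWorkflow | mms_extractor_exp/tests/debug_line186_rule.py | result_dict_items
-- ===== SOURCE A (Python) =====
-- def result_dict_items(result_dict, patterns):
--     """Find items in result_dict matching any pattern."""
--     items = []
--     for k in result_dict.keys():
--         for p in patterns:
--             if p in k or k == p:
--                 items.append(k)
--                 break
--     return items
-- ===== SOURCE B (Python) =====
-- def result_dict_items(result_dict, patterns):
--     """Find items in result_dict matching any pattern."""
--     matched = set()
--     pending = list(result_dict.keys())
--     for p in patterns:
--         if not pending:
--             break
--         still = []
--         for k in pending: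
--             if p in k:
--                 matched.add(k)
--             else:
--                 still.append(k)
--         pending = still
--     return [k for k in result_dict.keys() if k in matched]
-- ===== Notes on version B (the rewrite author's own statement) =====
-- stated objective: alternative
-- what changed: Pattern-major traversal with a shrinking pending pool: B scans the not-yet-matched keys once per pattern, moving matched keys into a set (dropping A's redundant 'k == p' test, which 'p in k' subsumes), and finally restores dict order with one membership filter, instead of A's key-major inner loop with break.
import Mathlib
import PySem

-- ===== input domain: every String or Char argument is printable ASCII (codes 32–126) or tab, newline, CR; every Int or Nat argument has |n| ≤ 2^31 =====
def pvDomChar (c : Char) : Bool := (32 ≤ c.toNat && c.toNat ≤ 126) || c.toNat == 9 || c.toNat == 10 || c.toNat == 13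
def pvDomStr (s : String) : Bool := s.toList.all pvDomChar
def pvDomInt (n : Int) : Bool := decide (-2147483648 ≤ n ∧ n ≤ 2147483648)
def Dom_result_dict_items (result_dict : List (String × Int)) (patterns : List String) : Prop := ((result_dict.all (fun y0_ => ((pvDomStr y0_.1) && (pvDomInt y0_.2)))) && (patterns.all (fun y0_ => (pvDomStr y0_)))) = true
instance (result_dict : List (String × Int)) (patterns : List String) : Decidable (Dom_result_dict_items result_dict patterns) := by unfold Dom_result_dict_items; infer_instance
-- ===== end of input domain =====

-- B replaces A's key-major scan with break by a pattern-major scan over a shrinking pool of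
-- not-yet-matched keys collecting a set (dropping the redundant 'k == p' test) followed by an
-- order-restoring filter (alternative).


-- ===== PORT A =====
-- for k in result_dict.keys(): for p in patterns: if p in k or k == p: items.append(k); break
def result_dict_items (result_dict : List (String × Int)) (patterns : List String) : List String :=
  (PySem.Dict.ofList result_dict).keys.foldl
    (fun items k =>
      if patterns.any (fun p => PySem.Str.isIn p k || k == p) then items ++ [k] else items)
    []

-- ===== PORT B =====
-- inner loop of Source B: one pass over `pending`; matched keys go into the set, others into `still`
def pvInnerB (p : String) (pending : List String) (s : PySem.Set String) :
    PySem.Set String × List String :=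
  pending.foldl
    (fun acc k =>
      if PySem.Str.isIn p k then (PySem.Set.add acc.1 k, acc.2) else (acc.1, acc.2 ++ [k]))
    (s, [])

-- outer loop of Source B: 'for p in patterns: if not pending: break; …'
def pvOuterB : List String → PySem.Set String → List String → PySem.Set String
  | [], s, _ => s
  | p :: rest, s, pending =>
      if pending.isEmpty then s
      else
        let r := pvInnerB p pending s
        pvOuterB rest r.1 r.2

def result_dict_items_alt (result_dict : List (String × Int)) (patterns : List String) : List String :=
  let keys := (PySem.Dict.ofList result_dict).keys
  let matched := pvOuterB patterns PySem.Set.empty keys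
  keys.filter (fun k => PySem.Set.contains matched k)

-- ===== PRECONDITION & SPEC =====
def Spec_result_dict_items (result_dict : List (String × Int)) (patterns : List String) (out : List String) : Prop := out = result_dict_items_alt result_dict patterns
instance (result_dict : List (String × Int)) (patterns : List String) (out : List String) : Decidable (Spec_result_dict_items result_dict patterns out) := by unfold Spec_result_dict_items; infer_instance

-- ===== CLAIM (what is proved, stated in full; the proofs are below) =====
def Claim_equal_result_dict_items : Prop := ∀ (result_dict : List (String × Int)) (patterns : List String), Dom_result_dict_items result_dict patterns → Spec_result_dict_items result_dict patterns (result_dict_items result_dict patterns)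

-- ===== LEMMAS AND PROOFS =====

-- the inner pass, from a general accumulator: membership of the set part, and the list part
theorem pv_innerB_fold (p : String) (pending : List String) (acc : PySem.Set String × List String) :
    (∀ x, x ∈ (pending.foldl
        (fun acc k =>
          if PySem.Str.isIn p k then (PySem.Set.add acc.1 k, acc.2) else (acc.1, acc.2 ++ [k]))
        acc).1 ↔ x ∈ acc.1 ∨ (x ∈ pending ∧ PySem.Str.isIn p x = true)) ∧
    (pending.foldl
        (fun acc k =>
          if PySem.Str.isIn p k then (PySem.Set.add acc.1 k, acc.2) else (acc.1, acc.2 ++ [k]))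
        acc).2 = acc.2 ++ pending.filter (fun k => !PySem.Str.isIn p k) := by
  induction pending generalizing acc with
  | nil => simp
  | cons k rest ih =>
    simp only [List.foldl_cons, List.mem_cons, List.filter_cons]
    by_cases hk : PySem.Str.isIn p k
    · constructor
      · intro x
        rw [(ih _).1]
        simp only [hk, if_pos, PySem.Set.mem_add]
        constructor
        · rintro ((h | rfl) | h)
          · exact Or.inl h
          · exact Or.inr ⟨Or.inl rfl, hk⟩
          · exact Or.inr ⟨Or.inr h.1, h.2⟩
        · rintro (h | ⟨(rfl | hm), hx⟩)
          · exact Or.inl (Or.inl h)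
          · exact Or.inl (Or.inr rfl)
          · exact Or.inr ⟨hm, hx⟩
      · rw [(ih _).2]
        have hk' : PySem.Chars.isIn p.toList k.toList = true := by simpa using hk
        simp [hk']
    · constructor
      · intro x
        rw [(ih _).1]
        simp only [hk, Bool.false_eq_true]
        constructor
        · rintro (h | h)
          · exact Or.inl h
          · exact Or.inr ⟨Or.inr h.1, h.2⟩
        · rintro (h | ⟨(rfl | hm), hx⟩)
          · exact Or.inl h
          · exact absurd hx hk
          · exact Or.inr ⟨hm, hx⟩
      · rw [(ih _).2]
        have hk' : PySem.Chars.isIn p.toList k.toList = false := by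
          simpa using hk
        simp [hk']

-- the outer loop: which keys end up in the matched set
theorem pv_mem_outerB (ps : List String) (s : PySem.Set String) (pending : List String) (x : String) :
    x ∈ pvOuterB ps s pending ↔
      x ∈ s ∨ (x ∈ pending ∧ ∃ p ∈ ps, PySem.Str.isIn p x = true) := by
  induction ps generalizing s pending with
  | nil => simp [pvOuterB]
  | cons p rest ih =>
    rw [pvOuterB]
    by_cases hemp : pending.isEmpty
    · rw [List.isEmpty_iff] at hemp
      subst hemp
      simp
    · simp only [hemp, Bool.false_eq_true, if_false]
      rw [ih]
      have h1 := (pv_innerB_fold p pending (s, [])).1 x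
      have h2 := (pv_innerB_fold p pending (s, [])).2
      unfold pvInnerB
      rw [h1, h2]
      simp only [List.nil_append, List.mem_filter, List.mem_cons, Bool.not_eq_eq_eq_not,
        Bool.not_true]
      constructor
      · rintro ((h | h) | ⟨⟨hm, _⟩, q, hq, hqx⟩)
        · exact Or.inl h
        · exact Or.inr ⟨h.1, p, Or.inl rfl, h.2⟩
        · exact Or.inr ⟨hm, q, Or.inr hq, hqx⟩
      · rintro (h | ⟨hm, q, (rfl | hq), hqx⟩)
        · exact Or.inl (Or.inl h)
        · exact Or.inl (Or.inr ⟨hm, hqx⟩)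
        · by_cases hpx : PySem.Str.isIn p x
          · exact Or.inl (Or.inr ⟨hm, hpx⟩)
          · exact Or.inr ⟨⟨hm, by simpa using hpx⟩, q, hq, hqx⟩

-- A's test: 'p in k or k == p' is 'p in k' (equality is a substring occurrence)
theorem pv_testA_eq (patterns : List String) (k : String) :
    patterns.any (fun p => PySem.Str.isIn p k || k == p) =
      patterns.any (fun p => PySem.Str.isIn p k) := by
  induction patterns with
  | nil => rfl
  | cons p rest ih =>
    simp only [List.any_cons, ih]
    congr 1
    by_cases hpk : k = p
    · subst hpk
      have h : PySem.Chars.isIn k.toList k.toList = true :=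
        (PySem.Chars.isIn_iff_infix _ _).mpr (List.infix_refl _)
      simp [h]
    · simp [hpk]

theorem result_dict_items_eq (result_dict : List (String × Int)) (patterns : List String) :
    result_dict_items result_dict patterns = result_dict_items_alt result_dict patterns := by
  unfold result_dict_items result_dict_items_alt
  rw [PySem.List.foldl_append_if_eq_filter]
  simp only [List.nil_append]
  apply List.filter_congr
  intro k hk
  rw [pv_testA_eq]
  rcases h : PySem.Set.contains _ k with _ | _
  · rw [Bool.eq_false_iff] at h ⊢
    intro hany
    apply h
    rw [PySem.Set.contains_iff, pv_mem_outerB]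
    rcases List.any_eq_true.mp hany with ⟨p, hp, hpk⟩
    exact Or.inr ⟨hk, p, hp, hpk⟩
  · have := (PySem.Set.contains_iff _ _).mp h
    rw [pv_mem_outerB] at this
    rcases this with h0 | ⟨_, p, hp, hpk⟩
    · simp [PySem.Set.empty] at h0
    · exact List.any_eq_true.mpr ⟨p, hp, hpk⟩

-- ===== VERDICT (by name: the statement is the Claim_ definition above) =====
theorem result_dict_items_spec : Claim_equal_result_dict_items := by
  intro result_dict patterns _
  unfold Spec_result_dict_items
  exact result_dict_items_eq result_dict patterns
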